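-- pv_equiv track=rewrite | github.com/robertvunabandi/mit-smart-confessions-data | quick_text_regression.py | update_sequences_with_new_word_index_map
-- ===== SOURCE A (Python) =====
-- def update_sequences_with_new_word_index_map(
-- 	raw_sequences: list,
-- 	raw_index_to_word: dict,
-- 	word_to_index: dict) -> list:
-- 	"""
-- 	:param raw_sequences : list[list[int]]
-- 	:param raw_index_to_word : dict<int, str>
-- 	:param word_to_index : dict<str, int>
-- 	:return list[list[int]]
-- 	"""
-- 	sequences = []
-- 	for sequence in raw_sequences:
-- 		sequences.append([word_to_index[raw_index_to_word[index]] for index in sequence])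
-- 	return sequences
-- ===== SOURCE B (Python) =====
-- def update_sequences_with_new_word_index_map(
-- 	raw_sequences: list,
-- 	raw_index_to_word: dict,
-- 	word_to_index: dict) -> list:
-- 	# Staged pipeline: flatten all sequences into one flat list, remap the flat
-- 	# list in a single pass, then re-split it back into sequences by their lengths.
-- 	flat = [index for sequence in raw_sequences for index in sequence]
-- 	mapped = [word_to_index[raw_index_to_word[index]] for index in flat]
-- 	sequences = []
-- 	pos = 0
-- 	for sequence in raw_sequences:
-- 		end = pos + len(sequence)
-- 		sequences.append(mapped[pos:end])
-- 		pos = end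
-- 	return sequences
-- ===== Notes on version B (the rewrite author's own statement) =====
-- stated objective: alternative
-- what changed: B replaces A's nested per-sequence loop by a staged pipeline: flatten all sequences into one flat list, remap that flat list in a single pass, then re-split it into sequences by slicing at the original lengths.
import Mathlib
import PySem

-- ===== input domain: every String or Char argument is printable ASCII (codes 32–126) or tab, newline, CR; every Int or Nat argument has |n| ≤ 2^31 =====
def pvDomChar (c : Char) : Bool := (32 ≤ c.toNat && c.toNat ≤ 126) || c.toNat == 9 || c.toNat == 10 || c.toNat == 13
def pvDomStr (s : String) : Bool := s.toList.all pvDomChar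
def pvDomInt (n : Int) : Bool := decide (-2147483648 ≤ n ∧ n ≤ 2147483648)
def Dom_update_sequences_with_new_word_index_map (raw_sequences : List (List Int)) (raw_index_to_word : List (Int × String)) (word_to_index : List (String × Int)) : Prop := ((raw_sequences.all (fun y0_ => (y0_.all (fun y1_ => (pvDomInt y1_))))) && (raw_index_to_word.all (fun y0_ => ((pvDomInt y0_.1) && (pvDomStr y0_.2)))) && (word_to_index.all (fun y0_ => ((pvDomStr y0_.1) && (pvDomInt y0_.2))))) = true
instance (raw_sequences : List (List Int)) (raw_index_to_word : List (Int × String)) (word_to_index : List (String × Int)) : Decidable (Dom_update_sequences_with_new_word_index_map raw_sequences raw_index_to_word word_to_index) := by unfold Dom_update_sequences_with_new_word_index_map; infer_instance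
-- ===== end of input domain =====

-- B re-decomposes A's nested loop into staged passes: flatten, one linear remap, re-split by slicing (objective: alternative).

-- Shared helper: the element translation word_to_index[raw_index_to_word[index]]
-- (none = KeyError, excluded by Pre_; the .getD 0 default is never taken inside Pre_).
def pvLookup (raw_index_to_word : List (Int × String)) (word_to_index : List (String × Int)) (index : Int) : Int :=
  (((PySem.Dict.mk raw_index_to_word).get? index).bind
    (fun w => (PySem.Dict.mk word_to_index).get? w)).getD 0

-- ===== PORT A =====
-- A: for each sequence, append [word_to_index[raw_index_to_word[index]] for index in sequence].
def update_sequences_with_new_word_index_map (raw_sequences : List (List Int)) (raw_index_to_word : List (Int × String)) (word_to_index : List (String × Int)) : List (List Int) :=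
  raw_sequences.foldl
    (fun sequences sequence =>
      sequences ++ [sequence.map (pvLookup raw_index_to_word word_to_index)])
    []

-- ===== PORT B =====
-- B: flat = [i for seq in raw_sequences for i in seq]; mapped = [lookup(i) for i in flat];
-- then the re-split loop over (sequences, pos): sequences.append(mapped[pos:pos+len(seq)]); pos advances.
def update_sequences_with_new_word_index_map_alt (raw_sequences : List (List Int)) (raw_index_to_word : List (Int × String)) (word_to_index : List (String × Int)) : List (List Int) :=
  let flat := raw_sequences.flatMap (fun sequence => sequence)
  let mapped := flat.map (pvLookup raw_index_to_word word_to_index)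
  (raw_sequences.foldl
    (fun st sequence =>
      (st.1 ++ [PySem.List.slice mapped (some st.2) (some (st.2 + (sequence.length : Int)))],
       st.2 + (sequence.length : Int)))
    (([], 0) : List (List Int) × Int)).1

-- ===== PRECONDITION & SPEC =====
-- Pre_ = exactly where Python A returns: every index of every sequence is a key of raw_index_to_word
-- whose word is a key of word_to_index (otherwise A raises KeyError).
def Pre_update_sequences_with_new_word_index_map (raw_sequences : List (List Int)) (raw_index_to_word : List (Int × String)) (word_to_index : List (String × Int)) : Prop :=
  ∀ sequence ∈ raw_sequences, ∀ index ∈ sequence,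
    (((PySem.Dict.mk raw_index_to_word).get? index).bind
      (fun w => (PySem.Dict.mk word_to_index).get? w)).isSome

instance (raw_sequences : List (List Int)) (raw_index_to_word : List (Int × String)) (word_to_index : List (String × Int)) : Decidable (Pre_update_sequences_with_new_word_index_map raw_sequences raw_index_to_word word_to_index) := by unfold Pre_update_sequences_with_new_word_index_map; infer_instance

def pvWitness_update_sequences_with_new_word_index_map : List (List Int) × (List (Int × String)) × (List (String × Int)) :=
  ([[1, 2], [2, 1, 1]], [(1, "a"), (2, "b")], [("a", 10), ("b", 20)])

def Spec_update_sequences_with_new_word_index_map (raw_sequences : List (List Int)) (raw_index_to_word : List (Int × String)) (word_to_index : List (String × Int)) (out : List (List Int)) : Prop := out = update_sequences_with_new_word_index_map_alt raw_sequences raw_index_to_word word_to_index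
instance (raw_sequences : List (List Int)) (raw_index_to_word : List (Int × String)) (word_to_index : List (String × Int)) (out : List (List Int)) : Decidable (Spec_update_sequences_with_new_word_index_map raw_sequences raw_index_to_word word_to_index out) := by unfold Spec_update_sequences_with_new_word_index_map; infer_instance

-- ===== CLAIM (what is proved, stated in full; the proofs are below) =====
def Claim_equal_update_sequences_with_new_word_index_map : Prop := ∀ (raw_sequences : List (List Int)) (raw_index_to_word : List (Int × String)) (word_to_index : List (String × Int)), Dom_update_sequences_with_new_word_index_map raw_sequences raw_index_to_word word_to_index → Pre_update_sequences_with_new_word_index_map raw_sequences raw_index_to_word word_to_index → Spec_update_sequences_with_new_word_index_map raw_sequences raw_index_to_word word_to_index (update_sequences_with_new_word_index_map raw_sequences raw_index_to_word word_to_index)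

-- ===== LEMMAS AND PROOFS =====

-- Re-splitting the flat mapped list by the original lengths recovers the per-sequence maps.
lemma pvResplit (f : Int → Int) (mapped : List Int) (seqs : List (List Int))
    (acc : List (List Int)) (pos : Nat)
    (h : mapped.drop pos = (seqs.flatMap (fun s => s)).map f) :
    (seqs.foldl
      (fun st sequence =>
        (st.1 ++ [PySem.List.slice mapped (some st.2) (some (st.2 + (sequence.length : Int)))],
         st.2 + (sequence.length : Int)))
      ((acc, (pos : Nat)) : List (List Int) × Int)).1
    = acc ++ seqs.map (fun s => s.map f) := by
  induction seqs generalizing acc pos with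
  | nil => simp
  | cons s rest ih =>
    have h1 : List.drop pos mapped = s.map f ++ (rest.flatMap (fun t => t)).map f := by
      simpa [List.flatMap_cons] using h
    have hcast : ((pos + s.length : Nat) : Int) = (pos : Int) + (s.length : Int) := by push_cast; ring
    have hslice : PySem.List.slice mapped (some (pos : Int)) (some ((pos + s.length : Nat) : Int))
        = s.map f := by
      rw [hcast, PySem.List.slice_natCast_add, h1]
      simp
    have hdrop : mapped.drop (pos + s.length) = (rest.flatMap (fun t => t)).map f := by
      rw [← List.drop_drop, h1]
      simp
    simp only [List.foldl_cons, ← hcast, hslice]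
    rw [ih (acc ++ [s.map f]) (pos + s.length) hdrop]
    simp

-- ===== VERDICT (by name: the statement is the Claim_ definition above) =====
theorem update_sequences_with_new_word_index_map_spec : Claim_equal_update_sequences_with_new_word_index_map := by
  intro raw_sequences raw_index_to_word word_to_index _ _
  unfold Spec_update_sequences_with_new_word_index_map
  unfold update_sequences_with_new_word_index_map update_sequences_with_new_word_index_map_alt
  rw [PySem.List.foldl_append_singleton_eq_map]
  exact ((pvResplit (pvLookup raw_index_to_word word_to_index)
      ((raw_sequences.flatMap (fun sequence => sequence)).map (pvLookup raw_index_to_word word_to_index))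
      raw_sequences [] 0 (by simp)).trans (by simp)).symm
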